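-- pv_equiv track=rewrite | github.com/ty-davis/CS4110 | proj2/context_free_grammar_assignment.py | recursive_parser
-- ===== SOURCE A (Python) =====
-- def recursive_parser(s: str) -> bool:
--     """
--     Recursive descent parser to check if string is balanced
--
--     Args
--     ----
--     s: str
--         Input string
--
--     Returns
--     -------
--     bool: True if string is balanced, False otherwise
--     """
--     opening_brackets = ['[', '(', '{']
--     closing_brackets = [']', ')', '}']
--
--     # find first opening bracket
--     min_open_idx = len(s) + 1
--     first_bracket = ''
--     for bracket in opening_brackets:
--         idx = s.find(bracket)
--         if idx >= 0 and idx < min_open_idx: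
--             min_open_idx = idx
--             first_bracket = bracket
--
--     if not first_bracket:
--         # make sure there isn't a closing bracket if no opening brackets were found
--         for bracket in closing_brackets:
--             if bracket in s:
--                 return False
--         else:
--             return True
--
--     # find its pair at the end
--     close_idx = s.rfind(closing_brackets[opening_brackets.index(first_bracket)])
--     if close_idx == -1:
--         return False
--
--     return recursive_parser(s[min_open_idx+1:close_idx]) and recursive_parser(s[close_idx+1:])
-- ===== SOURCE B (Python) =====
-- def recursive_parser(s: str) -> bool:
--     """Iterative re-implementation: an explicit worklist of segments replaces A's tree recursion."""
--     stack = [s]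
--     while stack:
--         seg = stack.pop()
--         nxt = next(((i, c) for i, c in enumerate(seg) if c in "[({"), None)
--         if nxt is None:
--             if any(c in "])}" for c in seg):
--                 return False
--             continue
--         open_idx, ch = nxt
--         close_ch = ")" if ch == "(" else "]" if ch == "[" else "}"
--         close_idx = seg.rfind(close_ch)
--         if close_idx == -1:
--             return False
--         stack.append(seg[close_idx + 1:])
--         stack.append(seg[open_idx + 1:close_idx])
--     return True
-- ===== Notes on version B (the rewrite author's own statement) =====
-- stated objective: alternative
-- what changed: A's tree recursion (two recursive calls per matched bracket pair) is replaced by an iterative worklist: a stack of pending string segments is popped and processed in a loop, pushing the inner and trailing slices, with a single character scan finding the earliest opening bracket instead of three find() calls plus a running minimum.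
import Mathlib
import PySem

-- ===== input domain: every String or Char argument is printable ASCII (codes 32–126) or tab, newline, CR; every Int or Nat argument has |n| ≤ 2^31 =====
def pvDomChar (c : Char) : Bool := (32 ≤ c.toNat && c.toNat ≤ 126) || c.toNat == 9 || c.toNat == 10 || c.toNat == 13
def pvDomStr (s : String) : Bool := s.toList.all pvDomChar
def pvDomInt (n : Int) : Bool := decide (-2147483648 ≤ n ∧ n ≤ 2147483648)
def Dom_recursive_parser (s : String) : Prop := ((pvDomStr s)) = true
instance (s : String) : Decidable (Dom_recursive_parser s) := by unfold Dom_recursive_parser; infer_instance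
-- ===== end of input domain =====

-- B replaces A's tree recursion with an iterative worklist of segments (same results; objective: alternative decomposition).

-- ===== PORT A =====
-- A is transliterated over the code points (List Char); PySem.Str.* are thin wrappers of PySem.Chars.* on .toList.
def pvOpeningBrackets : List Char := ['[', '(', '{']
def pvClosingBrackets : List Char := [']', ')', '}']

-- the 'find first opening bracket' loop of A (foldl over the three brackets, same state (min_open_idx, first_bracket))
def pvScanA (cs : List Char) : Int × Option Char :=
  pvOpeningBrackets.foldl
    (fun (acc : Int × Option Char) bracket =>
      let idx := PySem.Chars.find cs [bracket]
      if 0 ≤ idx ∧ idx < acc.1 then (idx, some bracket) else acc)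
    (((cs.length : Int)) + 1, none)

-- bound on rfind, cited by the ports' decreasing_by (a lemma the ports need for termination)
theorem pvRfindGo_bound (s sub : List Char) (hsub : sub ≠ []) :
    ∀ j, PySem.Chars.rfind.go s sub j = -1 ∨
      (0 ≤ PySem.Chars.rfind.go s sub j ∧ (PySem.Chars.rfind.go s sub j).toNat < s.length) := by
  intro j
  induction j with
  | zero =>
      rw [PySem.Chars.rfind.go]
      by_cases h : sub.isPrefixOf s
      · right
        have hpre : sub <+: s := by simpa [List.isPrefixOf_iff_prefix] using h
        have hls : sub.length ≤ s.length := hpre.length_le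
        have : 0 < sub.length := List.length_pos_iff.mpr hsub
        simp [h]
        omega
      · left; simp [h]
  | succ j ih =>
      rw [PySem.Chars.rfind.go]
      by_cases h : sub.isPrefixOf (s.drop (j + 1))
      · right
        have hpre : sub <+: s.drop (j + 1) := by simpa [List.isPrefixOf_iff_prefix] using h
        have hls : sub.length ≤ (s.drop (j + 1)).length := hpre.length_le
        have h0 : 0 < sub.length := List.length_pos_iff.mpr hsub
        have : j + 1 < s.length := by simp [List.length_drop] at hls; omega
        simp [h]
        omega
      · simpa [h] using ih

theorem pvRfind_bound (s sub : List Char) (hsub : sub ≠ [])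
    (h : PySem.Chars.rfind s sub ≠ -1) :
    0 ≤ PySem.Chars.rfind s sub ∧ (PySem.Chars.rfind s sub).toNat < s.length := by
  have := pvRfindGo_bound s sub hsub s.length
  unfold PySem.Chars.rfind at h ⊢
  tauto

def recursive_parser_go (cs : List Char) : Bool :=
  -- find first opening bracket
  let st := pvScanA cs
  match st.2 with
  | none =>
      -- make sure there isn't a closing bracket if no opening brackets were found
      if pvClosingBrackets.any (fun b => PySem.Chars.isIn [b] cs) then false else true
  | some fb =>
      -- closing_brackets[opening_brackets.index(first_bracket)]
      match PySem.List.index? pvOpeningBrackets fb with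
      | none => false  -- unreachable (Python would raise ValueError)
      | some i =>
        match PySem.List.pyGet? pvClosingBrackets (i : Int) with
        | none => false  -- unreachable
        | some cb =>
          let close_idx := PySem.Chars.rfind cs [cb]
          if h : close_idx = -1 then false
          else recursive_parser_go (PySem.List.slice cs (some (st.1 + 1)) (some close_idx)) &&
               recursive_parser_go (PySem.List.slice cs (some (close_idx + 1)) none)
termination_by cs.length
decreasing_by
  · have hb := pvRfind_bound cs [cb] (by simp) h
    rw [PySem.List.length_slice]
    have h2 : PySem.List.clampIdx cs.length (PySem.Chars.rfind cs [cb]) = (PySem.Chars.rfind cs [cb]).toNat := by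
      have : PySem.Chars.rfind cs [cb] = ((PySem.Chars.rfind cs [cb]).toNat : Int) := (Int.toNat_of_nonneg hb.1).symm
      rw [this, PySem.List.clampIdx_natCast]
      omega
    omega
  · have hb := pvRfind_bound cs [cb] (by simp) h
    rw [PySem.List.slice_from cs (by omega)]
    have : (PySem.Chars.rfind cs [cb] + 1).toNat = (PySem.Chars.rfind cs [cb]).toNat + 1 := by omega
    rw [List.length_drop, this]
    omega

def recursive_parser (s : String) : Bool := recursive_parser_go s.toList

-- ===== PORT B =====
-- Source B: explicit worklist of segments; pop a segment, find the earliest opening bracket,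
-- rfind its matching closer, push the inner and the trailing slices.
def pvIsOpen (c : Char) : Bool := c = '[' || c = '(' || c = '{'
def pvIsClose (c : Char) : Bool := c = ']' || c = ')' || c = '}'
def pvCloseOf (ch : Char) : Char := if ch = '(' then ')' else if ch = '[' then ']' else '}'

def recursive_parser_alt_loop (stack : List (List Char)) : Bool :=
  match stack with
  | [] => true
  | seg :: rest =>
    match (PySem.List.enumerate seg).find? (fun q => pvIsOpen q.2) with
    | none =>
        if seg.any pvIsClose then false
        else recursive_parser_alt_loop rest
    | some (open_idx, ch) =>
        let close_ch := pvCloseOf ch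
        let close_idx := PySem.Chars.rfind seg [close_ch]
        if h : close_idx = -1 then false
        else recursive_parser_alt_loop
              (PySem.List.slice seg (some (open_idx + 1)) (some close_idx) ::
               PySem.List.slice seg (some (close_idx + 1)) none :: rest)
termination_by ((stack.map List.length).sum, stack.length)
decreasing_by
  · apply Prod.Lex.right'
    · simp
    · simp
  · apply Prod.Lex.left
    have hb := pvRfind_bound seg [pvCloseOf ch] (by simp) h
    have h1 : (PySem.List.slice seg (some (open_idx + 1)) (some (PySem.Chars.rfind seg [pvCloseOf ch]))).length
        ≤ (PySem.Chars.rfind seg [pvCloseOf ch]).toNat := by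
      rw [PySem.List.length_slice]
      have h2 : PySem.List.clampIdx seg.length (PySem.Chars.rfind seg [pvCloseOf ch]) = (PySem.Chars.rfind seg [pvCloseOf ch]).toNat := by
        have : PySem.Chars.rfind seg [pvCloseOf ch] = ((PySem.Chars.rfind seg [pvCloseOf ch]).toNat : Int) := (Int.toNat_of_nonneg hb.1).symm
        rw [this, PySem.List.clampIdx_natCast]
        omega
      omega
    have h3 : (PySem.List.slice seg (some (PySem.Chars.rfind seg [pvCloseOf ch] + 1)) none).length
        = seg.length - ((PySem.Chars.rfind seg [pvCloseOf ch]).toNat + 1) := by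
      rw [PySem.List.slice_from seg (by omega), List.length_drop]
      congr 1
      omega
    simp only [List.map_cons, List.sum_cons]
    omega

def recursive_parser_alt (s : String) : Bool := recursive_parser_alt_loop [s.toList]

-- ===== PRECONDITION & SPEC =====
def Spec_recursive_parser (s : String) (out : Bool) : Prop := out = recursive_parser_alt s
instance (s : String) (out : Bool) : Decidable (Spec_recursive_parser s out) := by unfold Spec_recursive_parser; infer_instance

-- ===== CLAIM (what is proved, stated in full; the proofs are below) =====
def Claim_equal_recursive_parser : Prop := ∀ (s : String), Dom_recursive_parser s → Spec_recursive_parser s (recursive_parser s)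

-- ===== LEMMAS AND PROOFS =====

theorem pv_single_prefix_iff {c : Char} {l : List Char} : [c] <+: l ↔ l.head? = some c := by
  constructor
  · rintro ⟨t, rfl⟩; rfl
  · intro h
    cases l with
    | nil => simp at h
    | cons a t =>
        simp at h
        exact ⟨t, by simp [h]⟩

theorem pv_single_infix_iff {c : Char} {l : List Char} : [c] <:+: l ↔ c ∈ l := by
  constructor
  · intro h; exact h.subset (by simp)
  · intro h
    obtain ⟨u, v, rfl⟩ := List.append_of_mem h
    exact ⟨u, v, by simp⟩

theorem pv_findIdx?_spec {p : Char → Bool} :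
    ∀ {cs : List Char} {j : Nat}, cs.findIdx? p = some j →
      j < cs.length ∧ p (cs.getD j ' ') = true ∧ ∀ i < j, p (cs.getD i ' ') = false := by
  intro cs
  induction cs with
  | nil => intro j h; simp at h
  | cons x xs ih =>
      intro j h
      rw [List.findIdx?_cons] at h
      by_cases hp : p x
      · simp [hp] at h
        subst h
        exact ⟨by simp, by simpa using hp, by omega⟩
      · simp [hp] at h
        obtain ⟨j', hj', rfl⟩ := h
        obtain ⟨h1, h2, h3⟩ := ih hj'
        refine ⟨by simpa using h1, by simpa using h2, ?_⟩
        intro i hi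
        cases i with
        | zero => simpa using hp
        | succ i => simpa using h3 i (by omega)

theorem pv_findIdx?_of {p : Char → Bool} :
    ∀ {cs : List Char} {j : Nat}, j < cs.length → p (cs.getD j ' ') = true →
      (∀ i < j, p (cs.getD i ' ') = false) → cs.findIdx? p = some j := by
  intro cs
  induction cs with
  | nil => intro j h; simp at h
  | cons x xs ih =>
      intro j hj hp hmin
      rw [List.findIdx?_cons]
      cases j with
      | zero => simp at hp; simp [hp]
      | succ j =>
          have hx : p x = false := by simpa using hmin 0 (by omega)
          rw [hx]
          simp only [Bool.false_eq_true, if_false]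
          rw [ih (by simpa using hj) (by simpa using hp)
            (fun i hi => by simpa using hmin (i + 1) (by omega))]
          rfl

theorem pv_find_singleton_none {cs : List Char} {c : Char}
    (h : cs.findIdx? (· == c) = none) : PySem.Chars.find cs [c] = -1 := by
  rw [PySem.Chars.find_eq_neg_one_iff, pv_single_infix_iff]
  rw [List.findIdx?_eq_none_iff] at h
  intro hc
  simpa using h c hc

theorem pv_find_singleton_some {cs : List Char} {c : Char} {j : Nat}
    (h : cs.findIdx? (· == c) = some j) : PySem.Chars.find cs [c] = (j : Int) := by
  obtain ⟨hj, hp, hmin⟩ := pv_findIdx?_spec h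
  have hc : cs.getD j ' ' = c := by simpa using hp
  have hcj : cs[j]? = some c := by
    rw [List.getD_eq_getElem?_getD, List.getElem?_eq_getElem hj] at hc
    simp only [Option.getD_some] at hc
    rw [List.getElem?_eq_getElem hj, hc]
  have hiff : ∀ i : Nat, ([c] <+: cs.drop i) ↔ cs[i]? = some c := by
    intro i
    rw [pv_single_prefix_iff, List.head?_drop]
  have hmem : c ∈ cs := by
    have : cs[j] = c := by
      have := hcj
      rw [List.getElem?_eq_getElem hj] at this
      simpa using this
    rw [← this]
    exact List.getElem_mem hj
  have hnn : 0 ≤ PySem.Chars.find cs [c] :=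
    (PySem.Chars.find_nonneg_iff cs [c]).mpr (pv_single_infix_iff.mpr hmem)
  obtain ⟨hpre, hlt⟩ := PySem.Chars.find_spec hnn
  set k := (PySem.Chars.find cs [c]).toNat with hk
  have hkc : cs[k]? = some c := (hiff k).mp hpre
  have hkl : k < cs.length := by
    rcases List.getElem?_eq_some_iff.mp hkc with ⟨hh, _⟩
    exact hh
  have hjk : j = k := by
    by_contra hne
    rcases Nat.lt_or_ge j k with hlt' | hge
    · exact absurd ((hiff j).mpr hcj) (hlt j hlt')
    · have hkj : k < j := by omega
      have hm := hmin k hkj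
      rw [List.getD_eq_getElem?_getD, hkc] at hm
      simp at hm
  omega

-- characterisation of A's scan loop: it returns the earliest opening bracket (and its index)
theorem pvScanA_eq (cs : List Char) :
    pvScanA cs =
      match cs.findIdx? pvIsOpen with
      | none => (((cs.length : Int)) + 1, none)
      | some j => ((j : Int), some (cs.getD j ' ')) := by
  have bracket_fact : ∀ {j : Nat}, cs.findIdx? pvIsOpen = some j → ∀ b : Char, pvIsOpen b = true →
      (cs.getD j ' ' = b ∧ PySem.Chars.find cs [b] = (j : Int)) ∨
      (cs.getD j ' ' ≠ b ∧ (PySem.Chars.find cs [b] = -1 ∨ (j : Int) < PySem.Chars.find cs [b])) := by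
    intro j hj b hb
    obtain ⟨hjl, hp, hmin⟩ := pv_findIdx?_spec hj
    by_cases hc : cs.getD j ' ' = b
    · left
      refine ⟨hc, pv_find_singleton_some (pv_findIdx?_of hjl (by simp only [hc, beq_self_eq_true]) ?_)⟩
      intro i hi
      have hval := hmin i hi
      by_contra hbad
      rcases Bool.eq_false_or_eq_true (cs.getD i ' ' == b) with h' | h'
      · rw [eq_of_beq h', hb] at hval
        exact absurd hval (by simp)
      · exact hbad h' 
    · right
      refine ⟨hc, ?_⟩
      cases hfi : cs.findIdx? (· == b) with
      | none => exact Or.inl (pv_find_singleton_none hfi)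
      | some k =>
          right
          rw [pv_find_singleton_some hfi]
          obtain ⟨hkl, hkp, hkmin⟩ := pv_findIdx?_spec hfi
          have hkb : cs.getD k ' ' = b := by simpa using hkp
          have hkj : k ≠ j := fun h => hc (by rw [← h]; exact hkb)
          have : ¬ k < j := by
            intro hlt
            have := hmin k hlt
            rw [hkb, hb] at this
            exact absurd this (by simp)
          have : j < k := by omega
          exact_mod_cast this
  cases hfi : cs.findIdx? pvIsOpen with
  | none =>
      rw [List.findIdx?_eq_none_iff] at hfi
      have hnone : ∀ b : Char, pvIsOpen b = true → PySem.Chars.find cs [b] = -1 := by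
        intro b hb
        apply pv_find_singleton_none
        rw [List.findIdx?_eq_none_iff]
        intro x hx
        by_contra hbad
        simp at hbad
        have := hfi x hx
        rw [hbad, hb] at this
        exact absurd this (by simp)
      simp only [pvScanA, pvOpeningBrackets, List.foldl_cons, List.foldl_nil]
      rw [hnone '[' (by decide), hnone '(' (by decide), hnone '{' (by decide)]
      norm_num
  | some j =>
      obtain ⟨hjl, hp, _⟩ := pv_findIdx?_spec hfi
      have h1 := bracket_fact hfi '[' (by decide)
      have h2 := bracket_fact hfi '(' (by decide)
      have h3 := bracket_fact hfi '{' (by decide)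
      simp only [pvScanA, pvOpeningBrackets, List.foldl_cons, List.foldl_nil]
      have hcases : cs.getD j ' ' = '[' ∨ cs.getD j ' ' = '(' ∨ cs.getD j ' ' = '{' := by
        have h' := hp
        unfold pvIsOpen at h'
        simp only [Bool.or_eq_true, decide_eq_true_eq] at h'
        tauto
      have hjlen : (j : Int) < (cs.length : Int) := by exact_mod_cast hjl
      rcases hcases with hc | hc | hc
      · rcases h1 with ⟨_, e1⟩ | ⟨hne, _⟩
        · rcases h2 with ⟨hb2, _⟩ | ⟨_, e2⟩
          · rw [hc] at hb2; exact absurd hb2 (by decide)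
          · rcases h3 with ⟨hb3, _⟩ | ⟨_, e3⟩
            · rw [hc] at hb3; exact absurd hb3 (by decide)
            · rw [e1, hc]
              rcases e2 with e2 | e2 <;> rcases e3 with e3 | e3 <;>
                split_ifs with hh1 hh2 hh3 <;> first | rfl | (exfalso; omega)
        · exact absurd hc hne
      · rcases h2 with ⟨_, e2⟩ | ⟨hne, _⟩
        · rcases h1 with ⟨hb1, _⟩ | ⟨_, e1⟩
          · rw [hc] at hb1; exact absurd hb1 (by decide)
          · rcases h3 with ⟨hb3, _⟩ | ⟨_, e3⟩
            · rw [hc] at hb3; exact absurd hb3 (by decide)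
            · rw [e2, hc]
              rcases e1 with e1 | e1 <;> rcases e3 with e3 | e3 <;>
                split_ifs with hh1 hh2 hh3 <;> first | rfl | (exfalso; omega)
        · exact absurd hc hne
      · rcases h3 with ⟨_, e3⟩ | ⟨hne, _⟩
        · rcases h1 with ⟨hb1, _⟩ | ⟨_, e1⟩
          · rw [hc] at hb1; exact absurd hb1 (by decide)
          · rcases h2 with ⟨hb2, _⟩ | ⟨_, e2⟩
            · rw [hc] at hb2; exact absurd hb2 (by decide)
            · rw [e3, hc]
              rcases e1 with e1 | e1 <;> rcases e2 with e2 | e2 <;>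
                split_ifs with hh1 hh2 hh3 <;> first | rfl | (exfalso; omega)
        · exact absurd hc hne

theorem pv_enum_find?_eq (cs : List Char) (p : Char → Bool) (s : Int) :
    (PySem.List.enumerate cs s).find? (fun q => p q.2)
      = (cs.findIdx? p).map (fun (j : Nat) => ((s + j : Int), cs.getD j ' ')) := by
  induction cs generalizing s with
  | nil => simp [PySem.List.enumerate_nil]
  | cons x xs ih =>
      rw [PySem.List.enumerate_cons, List.find?_cons]
      by_cases hp : p x
      · simp [hp, List.findIdx?_cons]
      · rw [List.findIdx?_cons]
        simp only [hp, Bool.false_eq_true, if_false]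
        rw [ih (s + 1)]
        cases hfi : xs.findIdx? p <;> simp
        omega

theorem pv_closing_any_eq (cs : List Char) :
    (pvClosingBrackets.any (fun b => PySem.Chars.isIn [b] cs)) = cs.any pvIsClose := by
  have hsingle : ∀ b : Char, PySem.Chars.isIn [b] cs = cs.contains b := by
    intro b
    by_cases hm : b ∈ cs
    · simp [hm]
      rw [PySem.Chars.isIn_iff_infix, pv_single_infix_iff]
      exact hm
    · simp [hm]
      rw [PySem.Chars.isIn_eq_false_iff, pv_single_infix_iff]
      exact hm
  simp only [pvClosingBrackets, List.any_cons, List.any_nil, hsingle, Bool.or_false]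
  rcases Bool.eq_false_or_eq_true (cs.any pvIsClose) with h | h <;> rw [h]
  · rw [List.any_eq_true] at h
    obtain ⟨x, hx, hpx⟩ := h
    have hx3 : x = ']' ∨ x = ')' ∨ x = '}' := by
      unfold pvIsClose at hpx
      simp only [Bool.or_eq_true, decide_eq_true_eq] at hpx
      tauto
    rcases hx3 with rfl | rfl | rfl <;> simp [List.contains_eq_mem, hx]
  · rw [List.any_eq_false] at h
    simp only [Bool.or_eq_false_iff]
    refine ⟨?_, ?_, ?_⟩ <;>
      · rw [List.contains_eq_mem]
        simp only [decide_eq_false_iff_not]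
        intro ha
        exact absurd (h _ ha) (by decide)

-- one-step characterisation of A's recursion in B's vocabulary
theorem pv_goA_step (cs : List Char) :
    recursive_parser_go cs =
      match (PySem.List.enumerate cs).find? (fun q => pvIsOpen q.2) with
      | none => !(cs.any pvIsClose)
      | some (i, ch) =>
          if PySem.Chars.rfind cs [pvCloseOf ch] = -1 then false
          else recursive_parser_go (PySem.List.slice cs (some (i + 1)) (some (PySem.Chars.rfind cs [pvCloseOf ch]))) &&
               recursive_parser_go (PySem.List.slice cs (some (PySem.Chars.rfind cs [pvCloseOf ch] + 1)) none) := by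
  rw [pv_enum_find?_eq cs pvIsOpen 0]
  cases hfi : cs.findIdx? pvIsOpen with
  | none =>
      rw [recursive_parser_go]
      have hscan : pvScanA cs = (((cs.length : Int)) + 1, none) := by rw [pvScanA_eq, hfi]
      rw [hscan]
      simp only [Option.map_none]
      rw [pv_closing_any_eq]
      cases h : cs.any pvIsClose <;> simp
  | some j =>
      rw [recursive_parser_go]
      have hscan : pvScanA cs = ((j : Int), some (cs.getD j ' ')) := by rw [pvScanA_eq, hfi]
      rw [hscan]
      obtain ⟨hjl, hp, _⟩ := pv_findIdx?_spec hfi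
      have hcases : cs.getD j ' ' = '[' ∨ cs.getD j ' ' = '(' ∨ cs.getD j ' ' = '{' := by
        have h' := hp
        unfold pvIsOpen at h'
        simp only [Bool.or_eq_true, decide_eq_true_eq] at h'
        tauto
      rcases hcases with hc | hc | hc
      · have hc' : cs[j]?.getD ' ' = '[' := by rw [← List.getD_eq_getElem?_getD]; exact hc
        rw [hc]
        have h1 : PySem.List.index? pvOpeningBrackets '[' = some 0 := by decide
        have h2 : PySem.List.pyGet? pvClosingBrackets ((0 : Nat) : Int) = some ']' := by decide
        simp only [Option.map_some, zero_add, h1, h2, pvCloseOf]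
        by_cases hrf : PySem.Chars.rfind cs [']'] = -1 <;> simp [hrf, hc']
      · have hc' : cs[j]?.getD ' ' = '(' := by rw [← List.getD_eq_getElem?_getD]; exact hc
        rw [hc]
        have h1 : PySem.List.index? pvOpeningBrackets '(' = some 1 := by decide
        have h2 : PySem.List.pyGet? pvClosingBrackets ((1 : Nat) : Int) = some ')' := by decide
        simp only [Option.map_some, zero_add, h1, h2, pvCloseOf]
        by_cases hrf : PySem.Chars.rfind cs [')'] = -1 <;> simp [hrf, hc']
      · have hc' : cs[j]?.getD ' ' = '{' := by rw [← List.getD_eq_getElem?_getD]; exact hc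
        rw [hc]
        have h1 : PySem.List.index? pvOpeningBrackets '{' = some 2 := by decide
        have h2 : PySem.List.pyGet? pvClosingBrackets ((2 : Nat) : Int) = some '}' := by decide
        simp only [Option.map_some, zero_add, h1, h2, pvCloseOf]
        by_cases hrf : PySem.Chars.rfind cs ['}'] = -1 <;> simp [hrf, hc']

-- B's worklist returns the conjunction of A over all pending segments
theorem pv_altLoop_eq_all (stack : List (List Char)) :
    recursive_parser_alt_loop stack = stack.all (fun seg => recursive_parser_go seg) := by
  induction stack using recursive_parser_alt_loop.induct with
  | case1 => simp [recursive_parser_alt_loop]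
  | case2 seg rest hfind hany =>
      rw [recursive_parser_alt_loop]
      simp only [hfind, hany, if_true]
      simp only [List.all_cons]
      rw [pv_goA_step seg, hfind]
      simp [hany]
  | case3 seg rest hfind hany ih =>
      rw [recursive_parser_alt_loop]
      simp only [hfind, hany]
      rw [ih]
      simp only [List.all_cons]
      rw [pv_goA_step seg, hfind]
      simp [hany]
  | case4 seg rest open_idx ch hfind close_ch close_idx hrf0 =>
      have hrf : PySem.Chars.rfind seg [pvCloseOf ch] = -1 := hrf0
      rw [recursive_parser_alt_loop]
      simp only [hfind]
      rw [dif_pos hrf]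
      simp only [List.all_cons]
      rw [pv_goA_step seg, hfind]
      simp [hrf]
  | case5 seg rest open_idx ch hfind close_ch close_idx hrf0 ih0 =>
      have hrf : ¬ PySem.Chars.rfind seg [pvCloseOf ch] = -1 := hrf0
      have ih : recursive_parser_alt_loop
            (PySem.List.slice seg (some (open_idx + 1)) (some (PySem.Chars.rfind seg [pvCloseOf ch])) ::
             PySem.List.slice seg (some (PySem.Chars.rfind seg [pvCloseOf ch] + 1)) :: rest)
          = (PySem.List.slice seg (some (open_idx + 1)) (some (PySem.Chars.rfind seg [pvCloseOf ch])) ::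
             PySem.List.slice seg (some (PySem.Chars.rfind seg [pvCloseOf ch] + 1)) :: rest).all
              (fun seg => recursive_parser_go seg) := ih0
      rw [recursive_parser_alt_loop]
      simp only [hfind]
      rw [dif_neg hrf]
      rw [ih]
      simp only [List.all_cons]
      rw [pv_goA_step seg, hfind]
      simp [hrf, Bool.and_assoc]

-- ===== VERDICT (by name: the statement is the Claim_ definition above) =====
theorem recursive_parser_spec : Claim_equal_recursive_parser := by
  unfold Claim_equal_recursive_parser
  intro s _
  unfold Spec_recursive_parser recursive_parser recursive_parser_alt
  rw [pv_altLoop_eq_all]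
  simp
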